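-- pv_equiv track=rewrite | github.com/winsli-art/Program | all zadachi/zadachi 2/screen13.py | probel
-- ===== SOURCE A (Python) =====
-- def probel(x):
--     result = ''
--     i_pred = ''
--     result_kon = ''
--     for i in x:
--         if i  != ' ' or i_pred != ' ':
--             result += i
--         i_pred = i
--     for j in range(1,len(result)):
--         result_kon += result[j]
--
--
--
--     return(result_kon)
-- ===== SOURCE B (Python) =====
-- import re
--
-- def probel(x):
--     # collapse every maximal run of literal spaces to one space, then drop the first character
--     return re.sub(' +', ' ', x)[1:]
-- ===== Notes on version B (the rewrite author's own statement) =====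
-- stated objective: faster
-- what changed: Replaces A's two explicit character loops (keep each char unless it and the previous one are both spaces, then rebuild the string index by index to drop the first char) with a single regex substitution collapsing each run of spaces, followed by a slice dropping the first character.
import Mathlib
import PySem

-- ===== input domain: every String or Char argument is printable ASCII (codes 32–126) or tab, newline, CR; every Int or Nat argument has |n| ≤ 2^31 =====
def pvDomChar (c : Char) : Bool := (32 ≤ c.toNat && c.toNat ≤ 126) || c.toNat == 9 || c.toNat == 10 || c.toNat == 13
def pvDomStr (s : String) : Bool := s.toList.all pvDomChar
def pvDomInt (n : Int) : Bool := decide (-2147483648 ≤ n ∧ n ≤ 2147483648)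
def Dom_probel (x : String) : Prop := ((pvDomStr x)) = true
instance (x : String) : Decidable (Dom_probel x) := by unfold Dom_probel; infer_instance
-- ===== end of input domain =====

-- B replaces A's two explicit character loops with one regex substitution `re.sub(' +', ' ', x)` plus a `[1:]` slice (idiomatic).

-- ===== PORT A =====
-- i_pred starts as the empty string '' and then holds the previous character: modelled as Option Char, none = ''.
def probel (x : String) : String :=
  let st := x.toList.foldl
    (fun (acc : List Char × Option Char) i =>
      ((if i ≠ ' ' ∨ acc.2 ≠ some ' ' then acc.1 ++ [i] else acc.1), some i))
    ([], none)
  let result := st.1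
  -- for j in range(1, len(result)): result_kon += result[j]  — j is always in range, so pyGetD is exact
  let result_kon := (PySem.List.pyRange 1 (result.length : Int) 1).foldl
    (fun acc j => acc ++ [PySem.List.pyGetD result j ' ']) []
  String.mk result_kon

-- ===== PORT B =====
-- hand model of re.sub(' +', ' ', x): every maximal run of spaces collapses to a single space;
-- exact, since the single replacement character equals the run's own character.
def collapseSp : List Char → List Char
  | [] => []
  | [c] => [c]
  | c :: d :: cs => if c = ' ' ∧ d = ' ' then collapseSp (d :: cs) else c :: collapseSp (d :: cs)

def probel_alt (x : String) : String :=
  String.mk (PySem.List.slice (collapseSp x.toList) (some 1) none)   -- [1:]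

-- ===== PRECONDITION & SPEC =====
def Spec_probel (x : String) (out : String) : Prop := out = probel_alt x
instance (x : String) (out : String) : Decidable (Spec_probel x out) := by unfold Spec_probel; infer_instance

-- ===== CLAIM (what is proved, stated in full; the proofs are below) =====
def Claim_equal_probel : Prop := ∀ (x : String), Dom_probel x → Spec_probel x (probel x)

-- ===== LEMMAS AND PROOFS =====

/-- Recursive form of A's first loop: the kept characters, given the previous character. -/
def loopA : List Char → Option Char → List Char
  | [], _ => []
  | c :: cs, p => (if c ≠ ' ' ∨ p ≠ some ' ' then [c] else []) ++ loopA cs (some c)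

lemma foldA (cs : List Char) (acc : List Char) (p : Option Char) :
    (cs.foldl
      (fun (a : List Char × Option Char) i =>
        ((if i ≠ ' ' ∨ a.2 ≠ some ' ' then a.1 ++ [i] else a.1), some i))
      (acc, p)).1 = acc ++ loopA cs p := by
  induction cs generalizing acc p with
  | nil => simp [loopA]
  | cons c cs ih =>
    simp only [List.foldl, loopA]
    by_cases h : c ≠ ' ' ∨ p ≠ some ' ' <;> simp [h, ih]

lemma loopA_eq_collapseSp (cs : List Char) :
    (∀ p : Option Char, p ≠ some ' ' → loopA cs p = collapseSp cs) ∧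
    collapseSp (' ' :: cs) = ' ' :: loopA cs (some ' ') := by
  induction cs with
  | nil => simp [loopA, collapseSp]
  | cons c cs ih =>
    constructor
    · intro p hp
      have hkeep : (c ≠ ' ' ∨ p ≠ some ' ') := Or.inr hp
      simp only [loopA, if_pos hkeep, List.singleton_append]
      by_cases hc : c = ' '
      · subst hc; exact ih.2.symm
      · rcases cs with _ | ⟨d, ds⟩
        · simp [loopA, collapseSp]
        · rw [show collapseSp (c :: d :: ds) = c :: collapseSp (d :: ds) from by
            simp [collapseSp, hc]]
          exact congrArg (c :: ·) (ih.1 (some c) (by simp [hc]))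
    · by_cases hc : c = ' '
      · subst hc
        rw [show collapseSp (' ' :: ' ' :: cs) = collapseSp (' ' :: cs) from by
          simp [collapseSp]]
        rw [ih.2]
        simp [loopA]
      · rw [show collapseSp (' ' :: c :: cs) = ' ' :: collapseSp (c :: cs) from by
          simp [collapseSp, hc]]
        simp only [loopA, if_pos (Or.inl hc), List.singleton_append]
        congr 1
        rcases cs with _ | ⟨d, ds⟩
        · simp [loopA, collapseSp]
        · rw [show collapseSp (c :: d :: ds) = c :: collapseSp (d :: ds) from by
            simp [collapseSp, hc]]
          exact congrArg (c :: ·) ((ih.1 (some c) (by simp [hc])).symm)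

/-- A's second loop reads indices 1 .. len-1; generalized over a prefix for the induction. -/
lemma mapIdx (cs : List Char) : ∀ pre : List Char,
    (PySem.List.pyRange (pre.length : Int) (((pre ++ cs).length : Nat) : Int) 1).map
      (fun j => PySem.List.pyGetD (pre ++ cs) j ' ') = cs := by
  induction cs with
  | nil =>
    intro pre
    rw [PySem.List.pyRange_one_eq_nil (by simp)]
    simp
  | cons c cs ih =>
    intro pre
    have hlt : (pre.length : Int) < (((pre ++ c :: cs).length : Nat) : Int) := by
      simp
    rw [PySem.List.pyRange_one_cons hlt]
    simp only [List.map_cons]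
    have h0 : PySem.List.pyGetD (pre ++ c :: cs) (pre.length : Int) ' ' = c := by
      rw [PySem.List.pyGetD_natCast]
      simp [List.getD]
    have hcast : ((pre.length : Int) + 1) = (((pre ++ [c]).length : Nat) : Int) := by simp
    have hlen : (((pre ++ c :: cs).length : Nat) : Int) = (((pre ++ [c] ++ cs).length : Nat) : Int) := by
      simp
    rw [h0, hcast, hlen]
    have h2 := ih (pre ++ [c])
    simpa using h2

lemma probel_eq (x : String) : probel x = String.mk ((loopA x.toList none).drop 1) := by
  unfold probel
  dsimp only
  rw [foldA, List.nil_append, PySem.List.foldl_append_singleton_eq_map, List.nil_append]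
  congr 1
  rcases h : loopA x.toList none with _ | ⟨c, cs⟩
  · rw [PySem.List.pyRange_one_eq_nil (by simp)]
    simp
  · have := mapIdx cs [c]
    simpa using this

-- ===== VERDICT (by name: the statement is the Claim_ definition above) =====
theorem probel_spec : Claim_equal_probel := by
  intro x _
  unfold Spec_probel probel_alt
  rw [probel_eq, PySem.List.slice_from_one,
    (loopA_eq_collapseSp x.toList).1 none (by simp), List.drop_one]
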